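-- pv_equiv track=rewrite | github.com/hongleishen/dev_matplot | cp_func.py | conv_square_wave
-- ===== SOURCE A (Python) =====
-- def conv_square_wave(lt, ls):
--     j = 0
--     t = lt[:]
--     v = ls[:]
--     for i in range(len(t)):
--         if (i == 0):
--             continue
--         i += j
--         if (v[i] != v[i - 1]):
--             t.insert(i, t[i])
--             v.insert(i, v[i - 1])
--             j += 1
--     return t, v
-- ===== SOURCE B (Python) =====
-- def conv_square_wave(lt, ls):
--     trans = [i for i in range(1, len(lt)) if ls[i] != ls[i - 1]]
--     t, v = [], []
--     prev = 0
--     for i in trans: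
--         t += lt[prev:i] + [lt[i]]
--         v += ls[prev:i] + [ls[i - 1]]
--         prev = i
--     t += lt[prev:]
--     v += ls[prev:]
--     return t, v
-- ===== Notes on version B (the rewrite author's own statement) =====
-- stated objective: alternative
-- what changed: Replaces A's in-place list.insert loop over the growing lists (each insert shifts the tail, with a running offset j) by first collecting the transition indices and then stitching the output from slices, appending the duplicate point at each transition.
import Mathlib
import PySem

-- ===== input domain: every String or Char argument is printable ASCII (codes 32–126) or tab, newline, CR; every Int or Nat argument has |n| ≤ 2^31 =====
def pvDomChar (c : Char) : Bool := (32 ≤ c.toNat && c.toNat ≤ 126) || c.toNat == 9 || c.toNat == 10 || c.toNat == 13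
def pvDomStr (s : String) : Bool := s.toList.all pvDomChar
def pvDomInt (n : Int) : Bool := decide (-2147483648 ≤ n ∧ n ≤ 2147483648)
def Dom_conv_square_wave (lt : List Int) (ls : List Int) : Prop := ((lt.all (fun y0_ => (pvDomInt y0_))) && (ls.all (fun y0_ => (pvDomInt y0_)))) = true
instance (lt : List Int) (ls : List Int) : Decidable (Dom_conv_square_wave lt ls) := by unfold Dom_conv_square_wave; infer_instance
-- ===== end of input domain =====

-- B replaces A's in-place list.insert loop (with a shift counter j over the growing lists) by
-- collecting the transition indices and stitching the output from slices (objective: alternative).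

-- ===== PORT A =====
-- loop body of A: state (j, t, v); i = 0 is skipped ('continue'); indexing via pyGetD
-- (in range under Pre_, where A raises no IndexError); list.insert is PySem.List.insert.
def convStepA (st : Int × List Int × List Int) (i : Nat) : Int × List Int × List Int :=
  if i = 0 then st
  else
    match st with
    | (j, t, v) =>
      let ii : Int := (i : Int) + j
      if PySem.List.pyGetD v ii 0 ≠ PySem.List.pyGetD v (ii - 1) 0 then
        (j + 1, PySem.List.insert t ii (PySem.List.pyGetD t ii 0),
                PySem.List.insert v ii (PySem.List.pyGetD v (ii - 1) 0))
      else (j, t, v)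

def conv_square_wave (lt : List Int) (ls : List Int) : List Int × List Int :=
  let r := (List.range lt.length).foldl convStepA (0, lt, ls)
  (r.2.1, r.2.2)

-- ===== PORT B =====
-- trans = [i for i in range(1, len(lt)) if ls[i] != ls[i-1]]  (ls[i] in range under Pre_)
def convTransB (lt : List Int) (ls : List Int) : List Int :=
  (PySem.List.pyRange 1 (lt.length : Int) 1).filter
    (fun i => PySem.List.pyGetD ls i 0 != PySem.List.pyGetD ls (i - 1) 0)

-- loop body of B: state (t, v, prev); stitch the slice up to the transition, then the duplicate point.
def convStepB (lt : List Int) (ls : List Int) (st : List Int × List Int × Int) (i : Int) :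
    List Int × List Int × Int :=
  (st.1 ++ PySem.List.slice lt (some st.2.2) (some i) ++ [PySem.List.pyGetD lt i 0],
   st.2.1 ++ PySem.List.slice ls (some st.2.2) (some i) ++ [PySem.List.pyGetD ls (i - 1) 0],
   i)

def conv_square_wave_alt (lt : List Int) (ls : List Int) : List Int × List Int :=
  let r := (convTransB lt ls).foldl (convStepB lt ls) ([], [], 0)
  (r.1 ++ PySem.List.slice lt (some r.2.2) none, r.2.1 ++ PySem.List.slice ls (some r.2.2) none)

-- ===== PRECONDITION & SPEC =====
-- Pre_ excludes exactly the inputs on which A raises IndexError (a value list shorter than a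
-- time list of at least two points); B raises IndexError on exactly the same inputs.
def Pre_conv_square_wave (lt : List Int) (ls : List Int) : Prop :=
  lt.length ≤ ls.length ∨ lt.length ≤ 1
instance (lt : List Int) (ls : List Int) : Decidable (Pre_conv_square_wave lt ls) := by
  unfold Pre_conv_square_wave; infer_instance

def pvWitness_conv_square_wave : List Int × List Int := ([0, 1, 2], [5, 5, 7])

def Spec_conv_square_wave (lt : List Int) (ls : List Int) (out : List Int × List Int) : Prop := out = conv_square_wave_alt lt ls
instance (lt : List Int) (ls : List Int) (out : List Int × List Int) : Decidable (Spec_conv_square_wave lt ls out) := by unfold Spec_conv_square_wave; infer_instance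

-- ===== CLAIM (what is proved, stated in full; the proofs are below) =====
def Claim_equal_conv_square_wave : Prop := ∀ (lt : List Int) (ls : List Int), Dom_conv_square_wave lt ls → Pre_conv_square_wave lt ls → Spec_conv_square_wave lt ls (conv_square_wave lt ls)

-- ===== LEMMAS AND PROOFS =====

-- Proof-side per-index pass F: appends each point, duplicating at value transitions.
-- A's fold equals F followed by ls's tail; B's slice-stitching fold also equals it.
def pvStepF (lt : List Int) (ls : List Int) (acc : List Int × List Int) (k : Nat) :
    List Int × List Int :=
  let acc :=
    if 0 < k ∧ PySem.List.pyGetD ls (k : Int) 0 ≠ PySem.List.pyGetD ls ((k : Int) - 1) 0 then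
      (acc.1 ++ [PySem.List.pyGetD lt (k : Int) 0], acc.2 ++ [PySem.List.pyGetD ls ((k : Int) - 1) 0])
    else acc
  (acc.1 ++ [PySem.List.pyGetD lt (k : Int) 0], acc.2 ++ [PySem.List.pyGetD ls (k : Int) 0])

lemma getD_mid (pre suf : List Int) (k : Nat) (ls : List Int) (hs : suf = ls.drop k) (hk : k < ls.length) :
    PySem.List.pyGetD (pre ++ suf) (pre.length : Int) 0 = ls.getD k 0 := by
  subst hs
  simp [PySem.List.pyGetD_natCast, List.getD, hk]

lemma getD_pred (pre suf : List Int) (h : pre ≠ []) :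
    PySem.List.pyGetD (pre ++ suf) ((pre.length : Int) - 1) 0 = (pre.getLast?).getD 0 := by
  have h1 : 1 ≤ pre.length := by cases pre <;> simp_all
  have : ((pre.length : Int) - 1) = ((pre.length - 1 : Nat) : Int) := by omega
  rw [this, PySem.List.pyGetD_natCast]
  simp [List.getD, List.getElem?_append_left (by omega : pre.length - 1 < pre.length),
    List.getLast?_eq_getElem?]

lemma insert_mid (pre suf : List Int) (x : Int) :
    PySem.List.insert (pre ++ suf) (pre.length : Int) x = pre ++ x :: suf := by
  rw [PySem.List.insert_natCast _ _ _ (by simp)]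
  simp

-- Invariant: after k iterations, A's state is F's accumulator followed by the untouched
-- tails, with j = (emitted length) - k; F's v so far ends in ls[k-1].
lemma conv_square_wave_inv (lt ls : List Int) (h : lt.length ≤ ls.length) :
    ∀ k, k ≤ lt.length →
      (List.range k).foldl convStepA (0, lt, ls)
        = ((((List.range k).foldl (pvStepF lt ls) ([], [])).1.length : Int) - k,
           ((List.range k).foldl (pvStepF lt ls) ([], [])).1 ++ lt.drop k,
           ((List.range k).foldl (pvStepF lt ls) ([], [])).2 ++ ls.drop k)
      ∧ ((List.range k).foldl (pvStepF lt ls) ([], [])).2.length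
          = ((List.range k).foldl (pvStepF lt ls) ([], [])).1.length
      ∧ k ≤ ((List.range k).foldl (pvStepF lt ls) ([], [])).1.length
      ∧ (0 < k → ((List.range k).foldl (pvStepF lt ls) ([], [])).2.getLast?
          = some (ls.getD (k - 1) 0)) := by
  intro k
  induction k with
  | zero => simp
  | succ k ih =>
    intro hk1
    have hklt : k < lt.length := hk1
    have hkls : k < ls.length := lt_of_lt_of_le hklt h
    obtain ⟨hA, hlen, hge, hlast⟩ := ih (Nat.le_of_lt hklt)
    set B := (List.range k).foldl (pvStepF lt ls) ([], []) with hB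
    rw [List.range_succ, List.foldl_append, List.foldl_append, List.foldl_cons, List.foldl_nil,
      List.foldl_cons, List.foldl_nil, hA, ← hB]
    have hdt : lt.drop k = lt[k] :: lt.drop (k+1) := List.drop_eq_getElem_cons hklt
    have hds : ls.drop k = ls[k] :: ls.drop (k+1) := List.drop_eq_getElem_cons hkls
    have hgk : ls.getD k 0 = ls[k] := by simp [List.getD, hkls]
    have hgtk : lt.getD k 0 = lt[k] := by simp [List.getD, hklt]
    rcases Nat.eq_zero_or_pos k with hk0 | hkpos
    · subst hk0
      have hBnil : B = ([], []) := by simp [hB]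
      simp only [hBnil, convStepA, pvStepF]
      simp [hdt, hds, PySem.List.pyGetD_zero, List.getD, hklt, hkls]
    · have hBne : B.2 ≠ [] := by
        intro hnil
        rw [hnil] at hlen
        simp at hlen
        omega
      have hBlen2 : B.2.length = B.1.length := hlen
      have hii : (k : Int) + ((B.1.length : Int) - k) = (B.1.length : Int) := by ring
      have hreadv : PySem.List.pyGetD (B.2 ++ ls.drop k) ((B.1.length : Int)) 0 = ls.getD k 0 := by
        rw [← hBlen2]; exact getD_mid _ _ k ls rfl hkls
      have hreadv1 : PySem.List.pyGetD (B.2 ++ ls.drop k) ((B.1.length : Int) - 1) 0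
          = ls.getD (k-1) 0 := by
        rw [← hBlen2, getD_pred _ _ hBne, hlast hkpos]
        rfl
      have hreadt : PySem.List.pyGetD (B.1 ++ lt.drop k) ((B.1.length : Int)) 0 = lt.getD k 0 :=
        getD_mid _ _ k lt rfl hklt
      have hbk : PySem.List.pyGetD ls (k : Int) 0 = ls.getD k 0 := by
        simp [PySem.List.pyGetD_natCast]
      have hbk1 : PySem.List.pyGetD ls ((k : Int) - 1) 0 = ls.getD (k-1) 0 := by
        have : ((k : Int) - 1) = ((k - 1 : Nat) : Int) := by omega
        rw [this, PySem.List.pyGetD_natCast]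
      have hbtk : PySem.List.pyGetD lt (k : Int) 0 = lt.getD k 0 := by
        simp [PySem.List.pyGetD_natCast]
      simp only [convStepA, pvStepF, if_neg (by omega : ¬ k = 0),
        hii, hreadv, hreadv1, hbk, hbk1, hbtk, hreadt, hkpos, true_and]
      by_cases hcond : ls.getD k 0 ≠ ls.getD (k-1) 0
      · rw [if_pos hcond, if_pos hcond]
        have hins2 : PySem.List.insert (B.2 ++ List.drop k ls) ((B.1.length : Int)) (ls.getD (k-1) 0)
            = B.2 ++ ls.getD (k-1) 0 :: List.drop k ls := by
          rw [← hBlen2]; exact insert_mid _ _ _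
        rw [insert_mid, hins2]
        refine ⟨?_, ?_, ?_, ?_⟩
        · simp only [hdt, hds, hgk, hgtk]
          refine Prod.ext ?_ (Prod.ext ?_ ?_)
          · simp only [List.length_append, List.length_cons, List.length_nil]; push_cast; ring
          · simp
          · simp
        · simp [hlen]
        · simp only [List.length_append, List.length_cons, List.length_nil]
          omega
        · intro _
          simp
      · rw [if_neg hcond, if_neg hcond]
        refine ⟨?_, ?_, ?_, ?_⟩
        · simp only [hdt, hds, hgk, hgtk]
          refine Prod.ext ?_ (Prod.ext ?_ ?_)
          · simp only [List.length_append, List.length_cons, List.length_nil]; push_cast; ring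
          · simp
          · simp
        · simp [hlen]
        · simp only [List.length_append, List.length_cons, List.length_nil]
          omega
        · intro _
          simp

-- Invariant for B: after the transitions below k are folded, the stitched output plus the
-- pending slice from prev = p up to k equals F's accumulator at k.
lemma alt_inv (lt ls : List Int) (h : lt.length ≤ ls.length) :
    ∀ k, k ≤ lt.length → ∃ p : Nat, p ≤ k ∧
      (((PySem.List.pyRange 1 (k : Int) 1).filter
          (fun i => PySem.List.pyGetD ls i 0 != PySem.List.pyGetD ls (i - 1) 0)).foldl
        (convStepB lt ls) ([], [], 0)).2.2 = (p : Int) ∧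
      (((PySem.List.pyRange 1 (k : Int) 1).filter
          (fun i => PySem.List.pyGetD ls i 0 != PySem.List.pyGetD ls (i - 1) 0)).foldl
        (convStepB lt ls) ([], [], 0)).1 ++ (lt.drop p).take (k - p)
        = ((List.range k).foldl (pvStepF lt ls) ([], [])).1 ∧
      (((PySem.List.pyRange 1 (k : Int) 1).filter
          (fun i => PySem.List.pyGetD ls i 0 != PySem.List.pyGetD ls (i - 1) 0)).foldl
        (convStepB lt ls) ([], [], 0)).2.1 ++ (ls.drop p).take (k - p)
        = ((List.range k).foldl (pvStepF lt ls) ([], [])).2 := by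
  intro k
  induction k with
  | zero =>
    intro _
    refine ⟨0, le_refl _, ?_, ?_, ?_⟩ <;>
      simp [PySem.List.pyRange_one_eq_nil (by norm_num : (0:Int) ≤ 1)]
  | succ k ih =>
    intro hk1
    have hklt : k < lt.length := hk1
    have hkls : k < ls.length := lt_of_lt_of_le hklt h
    have htk : (lt.drop k).take 1 = [PySem.List.pyGetD lt (k : Int) 0] := by
      rw [List.take_one, List.head?_drop, List.getElem?_eq_getElem hklt]
      simp [PySem.List.pyGetD_natCast, List.getD, hklt]
    have hsk : (ls.drop k).take 1 = [PySem.List.pyGetD ls (k : Int) 0] := by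
      rw [List.take_one, List.head?_drop, List.getElem?_eq_getElem hkls]
      simp [PySem.List.pyGetD_natCast, List.getD, hkls]
    rcases Nat.eq_zero_or_pos k with hk0 | hkpos
    · subst hk0
      simp only [List.drop_zero, Nat.cast_zero] at htk hsk
      refine ⟨0, by omega, ?_, ?_, ?_⟩ <;>
        simp [PySem.List.pyRange_one_eq_nil (by norm_num : (1:Int) ≤ 1), pvStepF, htk, hsk]
    · obtain ⟨p, hpk, hprev, hT, hV⟩ := ih (Nat.le_of_lt hklt)
      have hsplit : PySem.List.pyRange 1 ((k+1 : Nat) : Int) 1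
          = PySem.List.pyRange 1 (k : Int) 1 ++ [(k : Int)] := by
        have : ((k+1 : Nat) : Int) = (k : Int) + 1 := by push_cast; ring
        rw [this, PySem.List.pyRange_one_succ_right (by exact_mod_cast hkpos)]
      rw [hsplit, List.filter_append, List.foldl_append, List.range_succ, List.foldl_append,
        List.foldl_cons, List.foldl_nil]
      set Bk := ((PySem.List.pyRange 1 (k : Int) 1).filter
          (fun i => PySem.List.pyGetD ls i 0 != PySem.List.pyGetD ls (i - 1) 0)).foldl
        (convStepB lt ls) ([], [], 0) with hBk
      set Fk := (List.range k).foldl (pvStepF lt ls) ([], []) with hFk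
      by_cases hc : PySem.List.pyGetD ls (k : Int) 0 ≠ PySem.List.pyGetD ls ((k : Int) - 1) 0
      · -- transition at k
        have hcondT : 0 < k ∧ PySem.List.pyGetD ls (k : Int) 0 ≠ PySem.List.pyGetD ls ((k : Int) - 1) 0 := ⟨hkpos, hc⟩
        have hfil : List.filter
            (fun i => PySem.List.pyGetD ls i 0 != PySem.List.pyGetD ls (i - 1) 0) [(k : Int)]
            = [(k : Int)] := by
          rw [List.filter_cons, List.filter_nil, if_pos (bne_iff_ne.mpr hc)]
        refine ⟨k, by omega, ?_, ?_, ?_⟩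
        · simp [hfil, convStepB]
        · rw [hfil, List.foldl_cons, List.foldl_nil]
          show (Bk.1 ++ PySem.List.slice lt (some Bk.2.2) (some (k : Int))
              ++ [PySem.List.pyGetD lt ((k : Int)) 0]) ++ (lt.drop k).take (k + 1 - k) = _
          rw [hprev, PySem.List.slice_natCast]
          have : k + 1 - k = 1 := by omega
          rw [this, htk]
          simp only [pvStepF, if_pos hcondT]
          rw [← hT]
        · rw [hfil, List.foldl_cons, List.foldl_nil]
          show (Bk.2.1 ++ PySem.List.slice ls (some Bk.2.2) (some (k : Int))
              ++ [PySem.List.pyGetD ls ((k : Int) - 1) 0]) ++ (ls.drop k).take (k + 1 - k) = _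
          rw [hprev, PySem.List.slice_natCast]
          have : k + 1 - k = 1 := by omega
          rw [this, hsk]
          simp only [pvStepF, if_pos hcondT]
          rw [← hV]
      · -- no transition at k
        have hfil : List.filter
            (fun i => PySem.List.pyGetD ls i 0 != PySem.List.pyGetD ls (i - 1) 0) [(k : Int)]
            = [] := by
          rw [List.filter_cons, List.filter_nil, if_neg]
          simp only [bne_iff_ne]
          exact hc
        have hcond : ¬ (0 < k ∧ PySem.List.pyGetD ls (k : Int) 0 ≠ PySem.List.pyGetD ls ((k : Int) - 1) 0) := by
          tauto
        have htake : ∀ (xs : List Int), k < xs.length →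
            (xs.drop p).take (k + 1 - p) = (xs.drop p).take (k - p) ++ [xs.getD k 0] := by
          intro xs hx
          have h1 : k + 1 - p = (k - p) + 1 := by omega
          rw [h1, List.take_add_one, List.getElem?_drop]
          have h2 : p + (k - p) = k := by omega
          rw [h2, List.getElem?_eq_getElem hx]
          simp [List.getD, hx]
        refine ⟨p, by omega, ?_, ?_, ?_⟩
        · simp [hfil, hprev]
        · rw [hfil, List.foldl_nil]
          rw [htake lt hklt, ← List.append_assoc, hT]
          simp only [pvStepF, if_neg hcond]
          simp [PySem.List.pyGetD_natCast]
        · rw [hfil, List.foldl_nil]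
          rw [htake ls hkls, ← List.append_assoc, hV]
          simp only [pvStepF, if_neg hcond]
          simp [PySem.List.pyGetD_natCast]

-- ===== VERDICT (by name: the statement is the Claim_ definition above) =====
theorem conv_square_wave_spec : Claim_equal_conv_square_wave := by
  intro lt ls _ hpre
  unfold Spec_conv_square_wave
  by_cases hle : lt.length ≤ ls.length
  · obtain ⟨hA, _, _, _⟩ := conv_square_wave_inv lt ls hle lt.length le_rfl
    obtain ⟨p, hpk, hprev, hT, hV⟩ := alt_inv lt ls hle lt.length le_rfl
    have hdt : lt.drop p = (lt.drop p).take (lt.length - p) ++ lt.drop lt.length := by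
      conv_lhs => rw [← List.take_append_drop (lt.length - p) (lt.drop p)]
      rw [List.drop_drop]
      have : p + (lt.length - p) = lt.length := by omega
      rw [this]
    have hds : ls.drop p = (ls.drop p).take (lt.length - p) ++ ls.drop lt.length := by
      conv_lhs => rw [← List.take_append_drop (lt.length - p) (ls.drop p)]
      rw [List.drop_drop]
      have : p + (lt.length - p) = lt.length := by omega
      rw [this]
    show conv_square_wave lt ls = conv_square_wave_alt lt ls
    unfold conv_square_wave conv_square_wave_alt convTransB
    rw [hA]
    simp only [hprev, PySem.List.slice_from_natCast]
    rw [hdt, hds, ← List.append_assoc, ← List.append_assoc, hT, hV]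
  · have h1 : lt.length = 1 ∧ ls.length = 0 := by
      rcases hpre with h | h
      · omega
      · omega
    obtain ⟨a, hlt⟩ : ∃ a, lt = [a] := by
      match lt, h1.1 with
      | [a], _ => exact ⟨a, rfl⟩
    have hls : ls = [] := List.eq_nil_of_length_eq_zero h1.2
    subst hlt hls
    show conv_square_wave [a] [] = conv_square_wave_alt [a] []
    unfold conv_square_wave conv_square_wave_alt convTransB
    simp [convStepA, List.range_succ,
      PySem.List.pyRange_one_eq_nil (by norm_num : (1:Int) ≤ 1), PySem.List.slice_none_none]
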